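-- pv_equiv track=rewrite | github.com/HeyyMrDJ/code_repo | programming/python/python_problem/main.py | check_repeating
-- ===== SOURCE A (Python) =====
-- def check_repeating(repeating_list: list) -> str:
--     "Function to check for repeating characters"
--
--     for line in repeating_list:
--         new_list = []
--         for char in line:
--             if char in new_list:
--                 return "FOUND"
--             new_list.append(char)
--
--     return "NONE"
-- ===== SOURCE B (Python) =====
-- def check_repeating(repeating_list: list) -> str:
--     "Function to check for repeating characters"
--
--     return "FOUND" if any(len(set(line)) != len(line) for line in repeating_list) else "NONE"
-- ===== Notes on version B (the rewrite author's own statement) =====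
-- stated objective: idiomatic
-- what changed: Replaces the per-character early-exit scan with a membership list by a per-line set-cardinality test (len(set(line)) != len(line)) under any() over the lines.
import Mathlib
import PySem

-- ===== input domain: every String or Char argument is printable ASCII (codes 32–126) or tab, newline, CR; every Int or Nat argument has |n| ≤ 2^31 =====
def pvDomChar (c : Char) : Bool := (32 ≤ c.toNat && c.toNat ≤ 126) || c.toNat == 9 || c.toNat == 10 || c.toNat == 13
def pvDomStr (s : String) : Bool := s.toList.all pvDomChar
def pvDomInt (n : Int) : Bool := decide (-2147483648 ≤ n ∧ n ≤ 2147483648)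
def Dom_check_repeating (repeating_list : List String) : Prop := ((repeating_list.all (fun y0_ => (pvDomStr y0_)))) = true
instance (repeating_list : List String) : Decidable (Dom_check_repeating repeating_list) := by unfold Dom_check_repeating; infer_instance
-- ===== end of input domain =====

-- B replaces A's per-character membership scan with an any() over a per-line set-cardinality test (idiomatic).

-- ===== PORT A =====
-- inner loop of A: scan the chars carrying the membership list new_list; true = "FOUND" was returned
def checkLineA (chars : List Char) (new_list : List Char) : Bool :=
  match chars with
  | [] => false
  | c :: rest => if new_list.contains c then true else checkLineA rest (new_list ++ [c])

def check_repeating (repeating_list : List String) : String :=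
  match repeating_list with
  | [] => "NONE"
  | line :: rest => if checkLineA line.toList [] then "FOUND" else check_repeating rest

-- ===== PORT B =====
def check_repeating_alt (repeating_list : List String) : String :=
  if repeating_list.any (fun line => (PySem.Set.ofList line.toList).length != line.toList.length)
  then "FOUND" else "NONE"

-- ===== PRECONDITION & SPEC =====
def Spec_check_repeating (repeating_list : List String) (out : String) : Prop := out = check_repeating_alt repeating_list
instance (repeating_list : List String) (out : String) : Decidable (Spec_check_repeating repeating_list out) := by unfold Spec_check_repeating; infer_instance

-- ===== CLAIM (what is proved, stated in full; the proofs are below) =====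
def Claim_equal_check_repeating : Prop := ∀ (repeating_list : List String), Dom_check_repeating repeating_list → Spec_check_repeating repeating_list (check_repeating repeating_list)

-- ===== LEMMAS AND PROOFS =====

theorem not_nodup_append_cons_of_mem {s rest : List Char} {c : Char} (hc : c ∈ s) :
    ¬ (s ++ c :: rest).Nodup := by
  intro hnd
  exact ((List.nodup_append.mp hnd).2.2) c hc c (List.mem_cons_self ..) rfl

theorem nodup_append_singleton {s : List Char} {c : Char} (h : s.Nodup) (hc : c ∉ s) :
    (s ++ [c]).Nodup := by
  simp [List.nodup_append, h]
  exact fun a ha he => hc (he ▸ ha)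

theorem checkLineA_iff (chars : List Char) : ∀ (acc : List Char), acc.Nodup →
    (checkLineA chars acc = true ↔ ¬ (acc ++ chars).Nodup) := by
  induction chars with
  | nil => intro acc h; simp [checkLineA, h]
  | cons c rest ih =>
    intro acc h
    by_cases hc : c ∈ acc
    · simp only [checkLineA, List.contains_eq_mem, hc, decide_true, if_true, true_iff]
      exact not_nodup_append_cons_of_mem hc
    · have h2 := ih (acc ++ [c]) (nodup_append_singleton h hc)
      simp only [checkLineA, List.contains_eq_mem, hc, decide_false, Bool.false_eq_true,
        if_false, List.append_assoc, List.singleton_append] at h2 ⊢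
      exact h2

theorem length_foldl_add_le (cs : List Char) : ∀ (s : List Char),
    (cs.foldl PySem.Set.add s).length ≤ s.length + cs.length := by
  induction cs with
  | nil => intro s; simp
  | cons c rest ih =>
    intro s
    have h := ih (PySem.Set.add s c)
    have : (PySem.Set.add s c).length ≤ s.length + 1 := by
      simp only [PySem.Set.add]; split <;> simp
    simp only [List.foldl_cons, List.length_cons]
    omega

theorem length_foldl_add_iff (cs : List Char) : ∀ (s : List Char), s.Nodup →
    ((cs.foldl PySem.Set.add s).length = s.length + cs.length ↔ (s ++ cs).Nodup) := by
  induction cs with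
  | nil => intro s h; simp [h]
  | cons c rest ih =>
    intro s h
    by_cases hc : c ∈ s
    · have hadd : PySem.Set.add s c = s := by
        simp [PySem.Set.add, PySem.Set.contains, hc]
      have hle := length_foldl_add_le rest s
      simp only [List.foldl_cons, hadd, List.length_cons]
      constructor
      · intro heq; exfalso; omega
      · intro hnd; exact absurd hnd (not_nodup_append_cons_of_mem hc)
    · have hadd : PySem.Set.add s c = s ++ [c] := by
        simp [PySem.Set.add, PySem.Set.contains, hc]
      have h2 := ih (s ++ [c]) (nodup_append_singleton h hc)
      rw [List.foldl_cons, hadd,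
        show s ++ c :: rest = (s ++ [c]) ++ rest by simp]
      simp only [List.length_append, List.length_cons, List.length_nil] at h2 ⊢
      constructor
      · intro heq; exact h2.mp (by omega)
      · intro hnd; have := h2.mpr hnd; omega

theorem ofList_length_ne_iff (cs : List Char) :
    (((PySem.Set.ofList cs).length != cs.length) = true) ↔ ¬ cs.Nodup := by
  have h := length_foldl_add_iff cs [] (by simp)
  simp only [List.nil_append, List.length_nil, Nat.zero_add] at h
  rw [PySem.Set.ofList_eq_foldl]
  constructor
  · intro hne hnd
    have := h.mpr hnd
    simp [this] at hne
  · intro hnd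
    have : (cs.foldl PySem.Set.add []).length ≠ cs.length := fun heq => hnd (h.mp heq)
    simpa [bne_iff_ne]

theorem line_bool_eq (line : String) :
    checkLineA line.toList [] = ((PySem.Set.ofList line.toList).length != line.toList.length) := by
  rw [Bool.eq_iff_iff, checkLineA_iff line.toList [] (by simp), ofList_length_ne_iff]
  simp

-- ===== VERDICT (by name: the statement is the Claim_ definition above) =====
theorem check_repeating_spec : Claim_equal_check_repeating := by
  intro repeating_list hd
  clear hd
  unfold Spec_check_repeating
  induction repeating_list with
  | nil => rfl
  | cons line rest ih =>
    show (if checkLineA line.toList [] then "FOUND" else check_repeating rest) = _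
    rw [line_bool_eq]
    unfold check_repeating_alt
    rw [List.any_cons]
    cases hb : ((PySem.Set.ofList line.toList).length != line.toList.length) with
    | true => simp
    | false =>
      simp only [Bool.false_or, Bool.false_eq_true, if_false]
      exact ih
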